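-- pv_equiv track=rewrite | github.com/dataOtter/CodeFights-Python3 | challenge7_chain_reaction1.py | board_to_final_form
-- ===== SOURCE A (Python) =====
-- def board_to_final_form(b, n):
--     ans = []
--     for c in range(n):
--         row = []
--         for r in range(n):
--             row.append(get_cell(b, n, c, r))
--         ans.append(row)
--     return ans
--
-- def get_cell(b, n, c, r):
--     return b[n * r + c]
-- ===== SOURCE B (Python) =====
-- def board_to_final_form(b, n):
--     rows = [b[i*n:(i+1)*n] for i in range(n)]
--     return [list(col) for col in zip(*rows)]
-- ===== Notes on version B (the rewrite author's own statement) =====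
-- stated objective: idiomatic
-- what changed: B builds the n row-slices b[i*n:(i+1)*n] and transposes them with zip(*rows), replacing A's nested index-arithmetic loops over b[n*r+c].
import Mathlib
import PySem

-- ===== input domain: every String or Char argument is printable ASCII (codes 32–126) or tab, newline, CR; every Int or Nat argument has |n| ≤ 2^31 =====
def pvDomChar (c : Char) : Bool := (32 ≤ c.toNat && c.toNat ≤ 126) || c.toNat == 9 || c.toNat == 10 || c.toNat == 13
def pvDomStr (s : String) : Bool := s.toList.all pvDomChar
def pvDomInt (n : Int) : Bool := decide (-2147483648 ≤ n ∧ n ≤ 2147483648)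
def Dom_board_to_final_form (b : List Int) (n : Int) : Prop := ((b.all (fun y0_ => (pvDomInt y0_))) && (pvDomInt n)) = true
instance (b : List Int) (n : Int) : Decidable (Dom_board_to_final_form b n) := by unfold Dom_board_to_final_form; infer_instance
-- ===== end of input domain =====

-- B: build the n row-slices and transpose them with zip(*rows) — idiomatic decomposition,
-- replacing A's nested index-arithmetic loops; return values proved equal on Pre_.

-- ===== PORT A =====
def get_cell (b : List Int) (n c r : Int) : Int :=
  PySem.List.pyGetD b (n * r + c) 0   -- b[n*r+c]; in range under Pre_

def board_to_final_form (b : List Int) (n : Int) : List (List Int) :=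
  (PySem.List.pyRange 0 n 1).foldl (fun ans c =>
    ans ++ [(PySem.List.pyRange 0 n 1).foldl (fun row r =>
      row ++ [get_cell b n c r]) []]) []

-- ===== PORT B =====
-- pvHeads rows = the tuple of first elements and the list of tails (none if some row is empty):
-- one step of Python's zip(*rows).
def pvHeads : List (List Int) → Option (List Int × List (List Int))
  | [] => some ([], [])
  | [] :: _ => none
  | (x :: xs) :: rest =>
      match pvHeads rest with
      | none => none
      | some (h, t) => some (x :: h, xs :: t)

-- termination measure for pvZipStar (cited by its decreasing_by)
theorem pvHeads_sum {rows : List (List Int)} {col : List Int} {rest : List (List Int)}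
    (h : pvHeads rows = some (col, rest)) :
    (rest.map List.length).sum + rows.length = (rows.map List.length).sum ∧
      col.length = rows.length := by
  induction rows generalizing col rest with
  | nil => simp [pvHeads] at h; simp [h.1, h.2]
  | cons row rows ih =>
    cases row with
    | nil => simp [pvHeads] at h
    | cons x xs =>
      simp only [pvHeads] at h
      cases hr : pvHeads rows with
      | none => rw [hr] at h; simp at h
      | some p =>
        obtain ⟨h1, t1⟩ := p
        rw [hr] at h
        simp only [Option.some.injEq, Prod.mk.injEq] at h
        obtain ⟨hc, ht⟩ := h
        obtain ⟨s1, s2⟩ := ih hr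
        subst hc; subst ht
        constructor
        · simp only [List.map_cons, List.sum_cons, List.length_cons]
          omega
        · simp [s2]

-- zip(*rows) for a nonempty rows (zip() with no arguments is empty)
def pvZipStar (rows : List (List Int)) : List (List Int) :=
  if rows = [] then []
  else
    match h : pvHeads rows with
    | none => []
    | some (col, rest) => col :: pvZipStar rest
termination_by (rows.map List.length).sum
decreasing_by
  obtain ⟨hs, hc⟩ := pvHeads_sum h
  have hl : rows.length ≠ 0 := by simp_all
  omega

def board_to_final_form_alt (b : List Int) (n : Int) : List (List Int) :=
  pvZipStar ((PySem.List.pyRange 0 n 1).map (fun i =>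
    PySem.List.slice b (some (i * n)) (some ((i + 1) * n))))

-- ===== PRECONDITION & SPEC =====
-- Pre_ excludes exactly the inputs where A raises IndexError: 0 < n with fewer than n*n cells.
def Pre_board_to_final_form (b : List Int) (n : Int) : Prop :=
  n ≤ 0 ∨ n * n ≤ (b.length : Int)
instance (b : List Int) (n : Int) : Decidable (Pre_board_to_final_form b n) := by
  unfold Pre_board_to_final_form; infer_instance

def pvWitness_board_to_final_form : List Int × Int := ([1, 2, 3, 4], 2)

def Spec_board_to_final_form (b : List Int) (n : Int) (out : List (List Int)) : Prop := out = board_to_final_form_alt b n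
instance (b : List Int) (n : Int) (out : List (List Int)) : Decidable (Spec_board_to_final_form b n out) := by unfold Spec_board_to_final_form; infer_instance

-- ===== CLAIM (what is proved, stated in full; the proofs are below) =====
def Claim_equal_board_to_final_form : Prop := ∀ (b : List Int) (n : Int), Dom_board_to_final_form b n → Pre_board_to_final_form b n → Spec_board_to_final_form b n (board_to_final_form b n)

-- ===== LEMMAS AND PROOFS =====

-- unfolding equation for pvZipStar on a successful pvHeads step
theorem pvZipStar_eq_cons {rows : List (List Int)} {col : List Int} {rest : List (List Int)}
    (hne : rows ≠ []) (h : pvHeads rows = some (col, rest)) :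
    pvZipStar rows = col :: pvZipStar rest := by
  rw [pvZipStar, if_neg hne]
  split <;> simp_all

-- when every row is nonempty, pvHeads splits rows into heads and tails
theorem pvHeads_of_all_cons (rows : List (List Int)) (h : ∀ row ∈ rows, row ≠ []) :
    pvHeads rows = some (rows.map (fun row => row.headD 0), rows.map List.tail) := by
  induction rows with
  | nil => simp [pvHeads]
  | cons row rows ih =>
    cases row with
    | nil => exact absurd rfl (h [] (by simp))
    | cons x xs =>
      simp only [pvHeads, ih (fun r hr => h r (by simp [hr]))]
      simp

-- transpose of a rectangular (width-C) nonempty matrix, column by column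
theorem pvZipStar_rect (C : ℕ) : ∀ (rows : List (List Int)), rows ≠ [] →
    (∀ row ∈ rows, row.length = C) →
    pvZipStar rows = (List.range C).map (fun c => rows.map (fun row => row.getD c 0)) := by
  induction C with
  | zero =>
    intro rows hne hlen
    obtain ⟨r, rs, rfl⟩ := List.exists_cons_of_ne_nil hne
    have : r = [] := List.eq_nil_of_length_eq_zero (hlen r (by simp))
    subst this
    rw [pvZipStar]
    simp [pvHeads]
  | succ C ih =>
    intro rows hne hlen
    have hcons : ∀ row ∈ rows, row ≠ [] := by
      intro row hr h0
      have := hlen row hr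
      simp [h0] at this
    rw [pvZipStar_eq_cons hne (pvHeads_of_all_cons rows hcons)]
    have htne : rows.map List.tail ≠ [] := by simpa using hne
    have htlen : ∀ row ∈ rows.map List.tail, row.length = C := by
      intro row hr
      obtain ⟨r0, hr0, rfl⟩ := List.mem_map.mp hr
      have := hlen r0 hr0
      simp [List.length_tail]
      omega
    rw [ih (rows.map List.tail) htne htlen]
    rw [List.range_succ_eq_map]
    simp only [List.map_cons, List.map_map]
    congr 1
    · apply List.map_congr_left
      intro row hr
      obtain ⟨y, ys, rfl⟩ := List.exists_cons_of_ne_nil (hcons row hr)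
      simp
    · apply List.map_congr_left
      intro c _
      simp only [Function.comp]
      apply List.map_congr_left
      intro row hr
      obtain ⟨y, ys, rfl⟩ := List.exists_cons_of_ne_nil (hcons row hr)
      simp

-- ===== VERDICT (by name: the statement is the Claim_ definition above) =====
theorem board_to_final_form_spec : Claim_equal_board_to_final_form := by
  intro b n _ hpre
  unfold Spec_board_to_final_form board_to_final_form board_to_final_form_alt
  by_cases hn : n ≤ 0
  · rw [PySem.List.pyRange_one_eq_nil hn]
    simp [pvZipStar]
  · replace hn : 0 < n := by omega
    have hlen : n * n ≤ (b.length : Int) := hpre.resolve_left (by omega)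
    set rows := (PySem.List.pyRange 0 n 1).map (fun i =>
      PySem.List.slice b (some (i * n)) (some ((i + 1) * n))) with hrows
    have hrne : rows ≠ [] := by
      intro h0
      have := congrArg List.length h0
      simp [hrows, PySem.List.length_pyRange_one] at this
      omega
    have hrl : ∀ row ∈ rows, row.length = n.toNat := by
      intro row hr
      obtain ⟨i, hi, rfl⟩ := List.mem_map.mp hr
      have hib := (PySem.List.mem_pyRange_one).mp hi
      have h1 : (0:Int) ≤ i * n := mul_nonneg hib.1 hn.le
      have h2 : (0:Int) ≤ (i + 1) * n := mul_nonneg (by omega) hn.le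
      rw [PySem.List.slice_toNat b h1 h2]
      have hsplit : (i + 1) * n = i * n + n := by ring
      have hub : (i + 1) * n ≤ n * n := by nlinarith [hib.1, hib.2]
      have hub2 : (i + 1) * n ≤ (b.length : Int) := le_trans hub hlen
      simp only [List.length_take, List.length_drop]
      omega
    rw [pvZipStar_rect n.toNat rows hrne hrl, hrows]
    simp only [PySem.List.foldl_append_singleton_eq_map, List.nil_append,
      PySem.List.pyRange_one, Int.sub_zero, zero_add, List.map_map]
    apply List.map_congr_left
    intro c hc
    have hcn : c < n.toNat := List.mem_range.mp hc
    simp only [Function.comp_apply, Function.comp_def]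
    apply List.map_congr_left
    intro i hi
    have hin : i < n.toNat := List.mem_range.mp hi
    have h0i : (0:Int) ≤ (i:Int) := Int.natCast_nonneg i
    have hiltn : (i:Int) < n := by omega
    have h1 : (0:Int) ≤ (i:Int) * n := mul_nonneg h0i hn.le
    have h2 : (0:Int) ≤ ((i:Int) + 1) * n := mul_nonneg (by omega) hn.le
    rw [PySem.List.slice_toNat b h1 h2]
    have hidx : (0:Int) ≤ n * (i:Int) + (c:Int) := by positivity
    have hlt : n * (i:Int) + (c:Int) < (b.length : Int) := by
      nlinarith [hiltn, hlen, (by omega : (c:Int) < n)]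
    rw [get_cell, PySem.List.pyGetD_eq_getElem (xs := b) (d := 0) hidx hlt]
    rw [List.getD_eq_getElem?_getD, List.getElem?_take, List.getElem?_drop]
    have hsplit : ((i:Int) + 1) * n = (i:Int) * n + n := by ring
    rw [if_pos (by omega)]
    have he2 : ((i:Int) * n).toNat + c = (n * (i:Int) + (c:Int)).toNat := by
      have : n * (i:Int) = (i:Int) * n := by ring
      omega
    rw [he2, List.getElem?_eq_getElem (by omega)]
    rfl
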